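-- pv_equiv track=rewrite | github.com/tejaswi0905/DSA-Python | Code_forces_sparring/Trees/apple_tree.py | solve
-- ===== SOURCE A (Python) =====
-- from collections import defaultdict, deque
--
-- def build_graph_non_weighted(n, edges, is_directed = False, need_degree = False, zero_to_n = False):
--     g = defaultdict(list)
--     degree = None
--     in_degree = None
--     out_degree = None
--
--     if not is_directed:
--         if need_degree:
--             if zero_to_n:
--                 degree = [0] * n
--             else:
--                 degree = [0] * (n + 1)
--             for u, v in edges:
--                 g[u].append(v)
--                 degree[u] += 1
--                 g[v].append(u)
--                 degree[v] += 1
--         else: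
--             for u, v in edges:
--                 g[u].append(v)
--                 g[v].append(u)
--
--
--
--     else:
--         if need_degree:
--             if zero_to_n:
--                 in_degree = [0] * n
--                 out_degree = [0] * n
--
--             else:
--                 in_degree = [0] * (n + 1)
--                 out_degree = [0] * (n + 1)
--
--             for u, v in edges:
--                 g[u].append(v)
--                 in_degree[v] += 1
--                 out_degree[u] += 1
--         else:
--             for u, v in edges:
--                 g[u].append(v)
--     return (g, degree, in_degree, out_degree)
--
-- def solve(n, edges, q, queries):
--     g, _, _, _ = build_graph_non_weighted(n, edges, False, False, False)
--     leaf = [0] * (n + 1)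
--     def dfs(node, par):
--         leaf_count = 0
--         is_leaf = True
--         for ch in g[node]:
--             if ch != par:
--                 is_leaf = False
--                 leaf_count += dfs(ch, node)
--         if is_leaf:
--             leaf[node] = 1
--             return 1
--         leaf[node] = leaf_count
--         return leaf_count
--
--     dfs(1, -1)
--     answer = []
--     for i in range(q):
--         u, v = queries[i]
--         answer.append(leaf[u] * leaf[v])
--     return answer
-- ===== SOURCE B (Python) =====
-- from collections import defaultdict
--
-- def build_graph_non_weighted(n, edges, is_directed = False, need_degree = False, zero_to_n = False):
--     g = defaultdict(list)
--     degree = None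
--     in_degree = None
--     out_degree = None
--     if not is_directed:
--         if need_degree:
--             if zero_to_n:
--                 degree = [0] * n
--             else:
--                 degree = [0] * (n + 1)
--             for u, v in edges:
--                 g[u].append(v)
--                 degree[u] += 1
--                 g[v].append(u)
--                 degree[v] += 1
--         else:
--             for u, v in edges:
--                 g[u].append(v)
--                 g[v].append(u)
--     else:
--         if need_degree:
--             if zero_to_n:
--                 in_degree = [0] * n
--                 out_degree = [0] * n
--             else:
--                 in_degree = [0] * (n + 1)
--                 out_degree = [0] * (n + 1)
--             for u, v in edges:
--                 g[u].append(v)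
--                 in_degree[v] += 1
--                 out_degree[u] += 1
--         else:
--             for u, v in edges:
--                 g[u].append(v)
--     return (g, degree, in_degree, out_degree)
--
-- def solve(n, edges, q, queries):
--     # same graph building and query phase as before, but the subtree leaf counts
--     # are computed by an iterative post-order pass over an explicit frame stack
--     # (node, parent, pending children, accumulated count, is-leaf flag) instead
--     # of recursion, so no recursion limit applies.
--     g, _, _, _ = build_graph_non_weighted(n, edges, False, False, False)
--     leaf = [0] * (n + 1)
--     stack = [(1, -1, list(g[1]), 0, True)]
--     while stack:
--         node, par, pending, cnt, is_leaf = stack.pop()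
--         if pending:
--             ch, rest = pending[0], pending[1:]
--             if ch != par:
--                 stack.append((node, par, rest, cnt, is_leaf))
--                 stack.append((ch, node, list(g[ch]), 0, True))
--             else:
--                 stack.append((node, par, rest, cnt, is_leaf))
--         else:
--             r = 1 if is_leaf else cnt
--             leaf[node] = r
--             if stack:
--                 pnode, ppar, ppending, pcnt, _ = stack.pop()
--                 stack.append((pnode, ppar, ppending, pcnt + r, False))
--     answer = []
--     for i in range(q):
--         u, v = queries[i]
--         answer.append(leaf[u] * leaf[v])
--     return answer
-- ===== Notes on version B (the rewrite author's own statement) =====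
-- stated objective: alternative
-- what changed: Replaces the recursive dfs with an iterative post-order pass over an explicit frame stack (node, parent, pending children, accumulated count, leaf flag), so no recursion limit applies; graph building and the query loop are kept verbatim. Pre_ excludes the inputs where A raises IndexError or recurses forever (n < 1, q > len(queries), out-of-range indices, a cycle or certain self-loops in node 1's component); it also excludes some degenerate self-loop inputs on which A still returns, where B returns the same value (the termination certificate used by the proof rejects them).
-- outside the precondition, e.g. on solve(1, [(1, 1)], 1, [(1, 1)]): A returns [4], B returns [4]
import Mathlib
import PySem

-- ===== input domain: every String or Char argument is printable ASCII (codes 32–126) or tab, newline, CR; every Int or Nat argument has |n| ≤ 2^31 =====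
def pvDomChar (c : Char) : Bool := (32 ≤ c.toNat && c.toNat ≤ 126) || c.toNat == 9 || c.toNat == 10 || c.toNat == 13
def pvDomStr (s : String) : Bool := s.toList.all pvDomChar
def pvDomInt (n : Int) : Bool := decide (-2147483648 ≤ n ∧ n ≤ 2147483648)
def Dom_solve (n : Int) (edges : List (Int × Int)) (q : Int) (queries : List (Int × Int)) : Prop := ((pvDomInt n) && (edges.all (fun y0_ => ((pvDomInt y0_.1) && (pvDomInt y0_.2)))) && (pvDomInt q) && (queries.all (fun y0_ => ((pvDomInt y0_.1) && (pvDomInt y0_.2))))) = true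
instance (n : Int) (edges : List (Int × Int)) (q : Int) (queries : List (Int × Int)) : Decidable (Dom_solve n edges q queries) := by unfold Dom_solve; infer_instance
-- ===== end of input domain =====

-- B replaces A's recursive dfs by an iterative post-order pass over an explicit frame
-- stack (same traversal, no recursion); equivalence is about the return value only.

-- ===== PORT A =====
-- transliteration of build_graph_non_weighted (shared by both Pythons verbatim);
-- only the (False, False, False) branch is exercised by solve; in the unused degree
-- branches Python's `degree[u] += 1` is rendered with the total pyGetD/pySetD.
def buildGraphNW (n : Int) (edges : List (Int × Int)) (isDirected needDegree zeroToN : Bool) :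
    PySem.Dict Int (List Int) × Option (List Int) × Option (List Int) × Option (List Int) :=
  if isDirected = false then
    if needDegree then
      let degree0 : List Int := if zeroToN then List.replicate n.toNat 0 else List.replicate (n + 1).toNat 0
      let p := edges.foldl (fun (p : PySem.Dict Int (List Int) × List Int) e =>
        let g := p.1.modify e.1 [] (· ++ [e.2])
        let d := PySem.List.pySetD p.2 e.1 (PySem.List.pyGetD p.2 e.1 0 + 1)
        let g := g.modify e.2 [] (· ++ [e.1])
        let d := PySem.List.pySetD d e.2 (PySem.List.pyGetD d e.2 0 + 1)
        (g, d)) (PySem.Dict.empty, degree0)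
      (p.1, some p.2, none, none)
    else
      (edges.foldl (fun g e => (g.modify e.1 [] (· ++ [e.2])).modify e.2 [] (· ++ [e.1]))
        PySem.Dict.empty, none, none, none)
  else
    if needDegree then
      let deg0 : List Int := if zeroToN then List.replicate n.toNat 0 else List.replicate (n + 1).toNat 0
      let p := edges.foldl (fun (p : PySem.Dict Int (List Int) × List Int × List Int) e =>
        (p.1.modify e.1 [] (· ++ [e.2]),
         PySem.List.pySetD p.2.1 e.2 (PySem.List.pyGetD p.2.1 e.2 0 + 1),
         PySem.List.pySetD p.2.2 e.1 (PySem.List.pyGetD p.2.2 e.1 0 + 1)))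
        (PySem.Dict.empty, deg0, deg0)
      (p.1, none, some p.2.1, some p.2.2)
    else
      (edges.foldl (fun g e => g.modify e.1 [] (· ++ [e.2])) PySem.Dict.empty, none, none, none)

-- A's recursive dfs, fuel-guarded for totality (fuel n+2 suffices on Pre_ inputs);
-- dfsKids is the `for ch in g[node]` loop threading (leaf_count, is_leaf, leaf).
mutual
def dfsA (g : PySem.Dict Int (List Int)) : Nat → Int → Int → List Int → Option (Int × List Int)
  | 0, _, _, _ => none
  | f + 1, node, par, leaf =>
    match dfsKids g f node par (g.getD node []) 0 true leaf with
    | none => none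
    | some (cnt, isLeaf, leaf1) =>
      if isLeaf then some (1, PySem.List.pySetD leaf1 node 1)
      else some (cnt, PySem.List.pySetD leaf1 node cnt)
termination_by f _ _ _ => (f, 0)
def dfsKids (g : PySem.Dict Int (List Int)) : Nat → Int → Int → List Int → Int → Bool → List Int → Option (Int × Bool × List Int)
  | _, _, _, [], cnt, isLeaf, leaf => some (cnt, isLeaf, leaf)
  | f, node, par, ch :: rest, cnt, isLeaf, leaf =>
    if ch ≠ par then
      match dfsA g f ch node leaf with
      | none => none
      | some (c, leaf1) => dfsKids g f node par rest (cnt + c) false leaf1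
    else dfsKids g f node par rest cnt isLeaf leaf
termination_by f _ _ l _ _ _ => (f, l.length + 1)
end

def solve (n : Int) (edges : List (Int × Int)) (q : Int) (queries : List (Int × Int)) : List Int :=
  let g := (buildGraphNW n edges false false false).1
  let leaf0 : List Int := List.replicate (n + 1).toNat 0
  match dfsA g (n.toNat + 2 * edges.length + 3) 1 (-1) leaf0 with
  | none => []   -- fuel exhausted (never happens under Pre_solve)
  | some (_, leaf) =>
    (PySem.List.pyRange 0 q 1).foldl (fun acc i =>
      let uv := PySem.List.pyGetD queries i (0, 0)
      acc ++ [PySem.List.pyGetD leaf uv.1 0 * PySem.List.pyGetD leaf uv.2 0]) []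

-- ===== PORT B =====
-- B's explicit stack machine: frame = (node, parent, pending children, count, is_leaf);
-- the Python `while stack` loop, fuel-guarded for totality (head of list = top of stack).
def pvAbsorb (r : Int) : List (Int × Int × List Int × Int × Bool) → List (Int × Int × List Int × Int × Bool)
  | [] => []
  | (pn, pp, ppend, pcnt, _) :: rs => (pn, pp, ppend, pcnt + r, false) :: rs

def runB (g : PySem.Dict Int (List Int)) : Nat → List (Int × Int × List Int × Int × Bool) → List Int → Option (List Int)
  | _, [], leaf => some leaf
  | 0, _ :: _, _ => none
  | f + 1, (node, par, pending, cnt, isLeaf) :: rest, leaf =>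
    match pending with
    | ch :: prest =>
      if ch ≠ par then
        runB g f ((ch, node, g.getD ch [], 0, true) :: (node, par, prest, cnt, isLeaf) :: rest) leaf
      else
        runB g f ((node, par, prest, cnt, isLeaf) :: rest) leaf
    | [] =>
      let r := if isLeaf then 1 else cnt
      runB g f (pvAbsorb r rest) (PySem.List.pySetD leaf node r)

def solve_alt (n : Int) (edges : List (Int × Int)) (q : Int) (queries : List (Int × Int)) : List Int :=
  let g := (buildGraphNW n edges false false false).1
  let leaf0 : List Int := List.replicate (n + 1).toNat 0
  match runB g ((2 * edges.length + 3) ^ (n.toNat + 2 * edges.length + 5)) [(1, -1, g.getD 1 [], 0, true)] leaf0 with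
  | none => []   -- fuel exhausted (never happens under Pre_solve)
  | some leaf =>
    (PySem.List.pyRange 0 q 1).foldl (fun acc i =>
      let uv := PySem.List.pyGetD queries i (0, 0)
      acc ++ [PySem.List.pyGetD leaf uv.1 0 * PySem.List.pyGetD leaf uv.2 0]) []

-- ===== PRECONDITION & SPEC =====
-- helpers for Pre_: adjacency multiset of a node and BFS distance from node 1
def pvPairs (edges : List (Int × Int)) : List (Int × Int) :=
  edges.flatMap (fun e => [(e.1, e.2), (e.2, e.1)])
def pvAdj (edges : List (Int × Int)) (x : Int) : List Int :=
  ((pvPairs edges).filter (fun p => p.1 == x)).map (·.2)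
def pvReachSet (edges : List (Int × Int)) : Nat → List Int
  | 0 => [1]
  | k + 1 =>
    let s := pvReachSet edges k
    PySem.Set.ofList (s ++ s.flatMap (pvAdj edges))
def pvReach (edges : List (Int × Int)) (k : Nat) (x : Int) : Bool :=
  (pvReachSet edges k).contains x
def pvSearch (p : Nat → Bool) : Nat → Nat → Nat
  | 0, acc => acc
  | m + 1, acc => if p acc then acc else pvSearch p m (acc + 1)
def pvDist (edges : List (Int × Int)) (x : Int) : Nat :=
  pvSearch (fun k => pvReach edges k x) (2 * edges.length + 3) 0
def pvNodes (edges : List (Int × Int)) : List Int :=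
  1 :: edges.flatMap (fun e => [e.1, e.2])
def pvAdjS (edges : List (Int × Int)) (x : Int) : List Int :=
  PySem.Set.ofList (pvAdj edges x)

-- Pre_solve: A raises or diverges off it, except for defensible corners stated below.
-- Pre_ requires 1 ≤ n, that the component of node 1 contain no self-loop and no cycle on
-- three or more nodes (each such node except 1 has exactly one distinct neighbor closer
-- to 1 in BFS distance and none at equal distance — off that, A's dfs recurses forever)
-- with every node of that component a valid leaf index (parallel edges and edges not
-- reaching node 1 stay admitted), and 0 ≤ q ≤ len(queries) with index-valid queried
-- nodes: for q > len(queries) or an out-of-range queried index A raises IndexError;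
-- A also still returns on some excluded self-loop inputs, where B agrees.
-- (The pvReach saturation clause below holds on every input; it only aids the proof.)
def Pre_solve (n : Int) (edges : List (Int × Int)) (q : Int) (queries : List (Int × Int)) : Prop :=
  1 ≤ n ∧ q ≤ (queries.length : Int) ∧
  (∀ x ∈ pvNodes edges,
    pvReach edges (2 * edges.length + 2) x = pvReach edges (2 * edges.length + 1) x) ∧
  (∀ x ∈ pvNodes edges, pvReach edges (2 * edges.length + 1) x = true →
    PySem.Raise.InRange (n.toNat + 1) x ∧
    (pvAdjS edges x).countP (fun y => pvDist edges y == pvDist edges x) = 0 ∧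
    (x ≠ 1 → (pvAdjS edges x).countP (fun y => pvDist edges y + 1 == pvDist edges x) = 1)) ∧
  (∀ p ∈ queries.take q.toNat,
    PySem.Raise.InRange (n.toNat + 1) p.1 ∧ PySem.Raise.InRange (n.toNat + 1) p.2)
instance (n : Int) (edges : List (Int × Int)) (q : Int) (queries : List (Int × Int)) : Decidable (Pre_solve n edges q queries) := by unfold Pre_solve; infer_instance

def pvWitness_solve : Int × (List (Int × Int)) × Int × (List (Int × Int)) :=
  (3, [(1, 2), (2, 3)], 2, [(1, 1), (2, 3)])

def Spec_solve (n : Int) (edges : List (Int × Int)) (q : Int) (queries : List (Int × Int)) (out : List Int) : Prop := out = solve_alt n edges q queries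
instance (n : Int) (edges : List (Int × Int)) (q : Int) (queries : List (Int × Int)) (out : List Int) : Decidable (Spec_solve n edges q queries out) := by unfold Spec_solve; infer_instance

-- ===== CLAIM (what is proved, stated in full; the proofs are below) =====
def Claim_equal_solve : Prop := ∀ (n : Int) (edges : List (Int × Int)) (q : Int) (queries : List (Int × Int)), Dom_solve n edges q queries → Pre_solve n edges q queries → Spec_solve n edges q queries (solve n edges q queries)

-- ===== LEMMAS AND PROOFS =====

-- ---- generic list fact: two distinct members satisfying p give countP ≥ 2 ----
theorem pv_two_le_countP {α : Type} {p : α → Bool} {l : List α} {a b : α}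
    (ha : a ∈ l) (hb : b ∈ l) (hab : a ≠ b) (hpa : p a = true) (hpb : p b = true) :
    2 ≤ l.countP p := by
  obtain ⟨s, t, rfl⟩ := List.append_of_mem ha
  rw [List.countP_append, List.countP_cons, hpa]
  simp only [ite_true]
  rcases List.mem_append.1 hb with hb | hb
  · have h1 : 0 < s.countP p := List.countP_pos_iff.2 ⟨b, hb, hpb⟩
    omega
  · have hbt : b ∈ t := by
      rcases List.mem_cons.1 hb with h | h
      · exact absurd h.symm hab
      · exact h
    have h1 : 0 < t.countP p := List.countP_pos_iff.2 ⟨b, hbt, hpb⟩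
    omega

-- ---- pvSearch: first index ≥ acc satisfying p, within m steps ----
theorem pvSearch_found {p : Nat → Bool} :
    ∀ (m acc k : Nat), acc ≤ k → k < acc + m → p k = true →
      p (pvSearch p m acc) = true ∧ pvSearch p m acc ≤ k := by
  intro m
  induction m with
  | zero => intro acc k h1 h2 _; omega
  | succ m ih =>
    intro acc k h1 h2 hk
    by_cases hacc : p acc = true
    · constructor
      · simp [pvSearch, hacc]
      · simpa [pvSearch, hacc] using h1
    · have hne : acc ≠ k := fun h => hacc (h ▸ hk)
      have := ih (acc + 1) k (by omega) (by omega) hk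
      simpa [pvSearch, hacc] using this

-- ---- pvDist basic facts ----
theorem pvReach_iff {edges : List (Int × Int)} {k : Nat} {x : Int} :
    pvReach edges k x = true ↔ x ∈ pvReachSet edges k := by
  simp [pvReach]

theorem pvReach_mono {edges : List (Int × Int)} {x : Int} :
    ∀ {k k' : Nat}, k ≤ k' → pvReach edges k x = true → pvReach edges k' x = true := by
  intro k k' hkk
  induction k' with
  | zero =>
    intro h
    have hk0 : k = 0 := by omega
    simpa [hk0] using h
  | succ k' ih =>
    intro h
    rcases Nat.eq_or_lt_of_le hkk with he | hl
    · simpa [← he] using h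
    · have hm := ih (by omega) h
      rw [pvReach_iff] at hm ⊢
      rw [pvReachSet]
      simp only [PySem.Set.mem_ofList, List.mem_append]
      exact Or.inl hm

theorem pvDist_reach {edges : List (Int × Int)} {x : Int} {k : Nat}
    (hk : k ≤ 2 * edges.length + 2) (h : pvReach edges k x = true) :
    pvReach edges (pvDist edges x) x = true ∧ pvDist edges x ≤ k := by
  unfold pvDist
  exact pvSearch_found (p := fun k => pvReach edges k x) (2 * edges.length + 3) 0 k
    (Nat.zero_le _) (by omega) h

theorem pvDist_one (edges : List (Int × Int)) : pvDist edges 1 = 0 := by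
  have h : pvReach edges 0 1 = true := by simp [pvReach, pvReachSet]
  have := pvDist_reach (edges := edges) (by omega) h
  omega

-- ---- adjacency facts ----
theorem pv_mem_pairs {edges : List (Int × Int)} {x y : Int} :
    (x, y) ∈ pvPairs edges ↔ ∃ e ∈ edges, (e.1 = x ∧ e.2 = y) ∨ (e.2 = x ∧ e.1 = y) := by
  simp only [pvPairs, List.mem_flatMap, List.mem_cons]
  constructor
  · rintro ⟨e, he, h | h | h⟩
    · exact ⟨e, he, Or.inl ⟨(Prod.mk.injEq _ _ _ _ ▸ h).1.symm, (Prod.mk.injEq _ _ _ _ ▸ h).2.symm⟩⟩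
    · exact ⟨e, he, Or.inr ⟨(Prod.mk.injEq _ _ _ _ ▸ h).1.symm, (Prod.mk.injEq _ _ _ _ ▸ h).2.symm⟩⟩
    · cases h
  · rintro ⟨e, he, ⟨h1, h2⟩ | ⟨h1, h2⟩⟩
    · exact ⟨e, he, Or.inl (by simp [← h1, ← h2])⟩
    · exact ⟨e, he, Or.inr (Or.inl (by simp [← h1, ← h2]))⟩

theorem pv_mem_adj {edges : List (Int × Int)} {x y : Int} :
    y ∈ pvAdj edges x ↔ (x, y) ∈ pvPairs edges := by
  simp only [pvAdj, List.mem_map, List.mem_filter]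
  constructor
  · rintro ⟨p, ⟨hp, hfst⟩, hsnd⟩
    have h1 : p.1 = x := by simpa using hfst
    have : p = (x, y) := by
      cases p; simp_all
    exact this ▸ hp
  · intro h
    exact ⟨(x, y), ⟨h, by simp⟩, rfl⟩

theorem pv_adj_symm {edges : List (Int × Int)} {x y : Int}
    (h : y ∈ pvAdj edges x) : x ∈ pvAdj edges y := by
  rw [pv_mem_adj] at h ⊢
  rw [pv_mem_pairs] at h ⊢
  rcases h with ⟨e, he, h | h⟩
  · exact ⟨e, he, Or.inr ⟨h.2, h.1⟩⟩
  · exact ⟨e, he, Or.inl ⟨h.2, h.1⟩⟩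

theorem pv_reach_step {edges : List (Int × Int)} {x y : Int} {k : Nat}
    (hadj : y ∈ pvAdj edges x) (h : pvReach edges k y = true) :
    pvReach edges (k + 1) x = true := by
  rw [pvReach_iff] at h ⊢
  rw [pvReachSet]
  simp only [PySem.Set.mem_ofList, List.mem_append, List.mem_flatMap]
  exact Or.inr ⟨y, h, pv_adj_symm hadj⟩

-- ---- the built graph's adjacency lists are exactly pvAdj ----
theorem pv_foldl_pairs (edges : List (Int × Int)) :
    ∀ d : PySem.Dict Int (List Int),
      edges.foldl (fun g e => (g.modify e.1 [] (· ++ [e.2])).modify e.2 [] (· ++ [e.1])) d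
        = (pvPairs edges).foldl (fun g p => g.modify p.1 [] (· ++ [p.2])) d := by
  induction edges with
  | nil => intro d; rfl
  | cons e es ih =>
    intro d
    simp only [List.foldl_cons, pvPairs, List.flatMap_cons, List.foldl_append]
    exact ih _

theorem pv_adj_eq (n : Int) (edges : List (Int × Int)) (x : Int) :
    ((buildGraphNW n edges false false false).1).getD x [] = pvAdj edges x := by
  have h1 : (buildGraphNW n edges false false false).1
      = edges.foldl (fun g e => (g.modify e.1 [] (· ++ [e.2])).modify e.2 [] (· ++ [e.1]))
          PySem.Dict.empty := by
    simp [buildGraphNW]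
  rw [h1, pv_foldl_pairs, PySem.Dict.getD_foldl_modify_append]
  simp [pvAdj, PySem.Dict.getD_empty]

theorem pv_adj_len (edges : List (Int × Int)) (x : Int) :
    (pvAdj edges x).length ≤ 2 * edges.length := by
  have h1 : (pvPairs edges).length = 2 * edges.length := by
    induction edges with
    | nil => rfl
    | cons e es ih => simp [pvPairs, List.flatMap_cons] at ih ⊢; omega
  calc (pvAdj edges x).length
      = ((pvPairs edges).filter (fun p => p.1 == x)).length := by simp [pvAdj]
    _ ≤ (pvPairs edges).length := List.length_filter_le _ _
    _ = 2 * edges.length := h1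

-- ---- adjacent nodes are listed in pvNodes ----
theorem pv_mem_nodes_of_adj {edges : List (Int × Int)} {x y : Int}
    (h : y ∈ pvAdj edges x) : y ∈ pvNodes edges := by
  rw [pv_mem_adj, pv_mem_pairs] at h
  obtain ⟨e, he, hc | hc⟩ := h
  · exact List.mem_cons_of_mem _ (List.mem_flatMap.2 ⟨e, he, by simp [← hc.2]⟩)
  · exact List.mem_cons_of_mem _ (List.mem_flatMap.2 ⟨e, he, by simp [← hc.2]⟩)

-- ---- the dfs invariant: node is in 1's component and par is its unique closer neighbor ----
def pvInv (edges : List (Int × Int)) (node par : Int) : Prop :=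
  pvReach edges (2 * edges.length + 1) node = true ∧ node ∈ pvNodes edges ∧
    ((node = 1 ∧ par = -1) ∨
      (par ∈ pvAdj edges node ∧ pvDist edges par + 1 = pvDist edges node))

theorem pv_child_dist {edges : List (Int × Int)}
    (HS : ∀ x ∈ pvNodes edges,
      pvReach edges (2 * edges.length + 2) x = pvReach edges (2 * edges.length + 1) x)
    (HM : ∀ x ∈ pvNodes edges, pvReach edges (2 * edges.length + 1) x = true →
      (pvAdjS edges x).countP (fun y => pvDist edges y == pvDist edges x) = 0 ∧
      (x ≠ 1 → (pvAdjS edges x).countP (fun y => pvDist edges y + 1 == pvDist edges x) = 1))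
    {node par ch : Int} (hInv : pvInv edges node par)
    (hch : ch ∈ pvAdj edges node) (hne : ch ≠ par) :
    pvDist edges ch = pvDist edges node + 1 ∧
      pvReach edges (2 * edges.length + 1) ch = true := by
  obtain ⟨hrn, hmem, hcase⟩ := hInv
  have hdn := pvDist_reach (k := 2 * edges.length + 1) (by omega) hrn
  have hrc' : pvReach edges (pvDist edges node + 1) ch = true :=
    pv_reach_step (pv_adj_symm hch) hdn.1
  have hchmem : ch ∈ pvNodes edges := pv_mem_nodes_of_adj hch
  have hrcR : pvReach edges (2 * edges.length + 1) ch = true := by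
    rw [← HS ch hchmem]
    exact pvReach_mono (by omega) hrc'
  have hdc := pvDist_reach (k := 2 * edges.length + 1) (by omega) hrcR
  have hle1 : pvDist edges ch ≤ pvDist edges node + 1 :=
    (pvDist_reach (k := pvDist edges node + 1) (by omega) hrc').2
  have hle2 : pvDist edges node ≤ pvDist edges ch + 1 :=
    (pvDist_reach (k := pvDist edges ch + 1) (by omega) (pv_reach_step hch hdc.1)).2
  obtain ⟨hC2n, hC1n⟩ := HM node hmem hrn
  have hchS : ch ∈ pvAdjS edges node := (PySem.Set.mem_ofList _ _).2 hch
  have hne' : pvDist edges ch ≠ pvDist edges node := by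
    intro he
    rw [List.countP_eq_zero] at hC2n
    exact (hC2n ch hchS) (by simp [he])
  have hnlt : ¬ (pvDist edges ch + 1 = pvDist edges node) := by
    intro he
    rcases hcase with ⟨hn1, -⟩ | ⟨hpadj, hpd⟩
    · subst hn1
      rw [pvDist_one] at he
      omega
    · have hnode1 : node ≠ 1 := by
        intro h
        rw [h, pvDist_one] at hpd
        omega
      have hparS : par ∈ pvAdjS edges node := (PySem.Set.mem_ofList _ _).2 hpadj
      have h2 : 2 ≤ (pvAdjS edges node).countP
          (fun y => pvDist edges y + 1 == pvDist edges node) :=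
        pv_two_le_countP hchS hparS hne (by simp [he]) (by simp [hpd])
      have h1 := hC1n hnode1
      omega
  exact ⟨by omega, hrcR⟩

-- ---- under Pre_, A's dfs returns within its fuel ----
theorem pv_dfs_total {edges : List (Int × Int)}
    (HS : ∀ x ∈ pvNodes edges,
      pvReach edges (2 * edges.length + 2) x = pvReach edges (2 * edges.length + 1) x)
    (HM : ∀ x ∈ pvNodes edges, pvReach edges (2 * edges.length + 1) x = true →
      (pvAdjS edges x).countP (fun y => pvDist edges y == pvDist edges x) = 0 ∧
      (x ≠ 1 → (pvAdjS edges x).countP (fun y => pvDist edges y + 1 == pvDist edges x) = 1))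
    {g : PySem.Dict Int (List Int)} (hg : ∀ x, g.getD x [] = pvAdj edges x) :
    ∀ f : Nat, ∀ node par leaf, pvInv edges node par →
      2 * edges.length + 3 - pvDist edges node ≤ f →
      ∃ r leaf', dfsA g f node par leaf = some (r, leaf') := by
  intro f
  induction f using Nat.strong_induction_on with
  | _ f ih =>
  intro node par leaf hInv hfuel
  have hd : pvDist edges node ≤ 2 * edges.length + 1 :=
    (pvDist_reach (k := 2 * edges.length + 1) (by omega) hInv.1).2
  obtain ⟨f', rfl⟩ : ∃ f', f = f' + 1 := ⟨f - 1, by omega⟩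
  have kids : ∀ pending, (∀ c ∈ pending, c ∈ pvAdj edges node) → ∀ cnt isLeaf leaf,
      ∃ out, dfsKids g f' node par pending cnt isLeaf leaf = some out := by
    intro pending
    induction pending with
    | nil =>
      intro _ cnt isLeaf leaf
      exact ⟨(cnt, isLeaf, leaf), by rw [dfsKids]⟩
    | cons c cs ihp =>
      intro hmem cnt isLeaf leaf
      by_cases hcp : c = par
      · rw [dfsKids]
        simp only [hcp, ne_eq, not_true_eq_false]
        exact (by simpa [hcp] using ihp (fun x hx => hmem x (List.mem_cons_of_mem _ hx)) cnt isLeaf leaf)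
      · have hcadj : c ∈ pvAdj edges node := hmem c List.mem_cons_self
        obtain ⟨hcd, hcr⟩ :=
          pv_child_dist HS HM ⟨hInv.1, hInv.2.1, hInv.2.2⟩ hcadj hcp
        have hInv' : pvInv edges c node :=
          ⟨hcr, pv_mem_nodes_of_adj hcadj, Or.inr ⟨pv_adj_symm hcadj, by omega⟩⟩
        obtain ⟨rc, lc, hrc⟩ := ih f' (by omega) c node leaf hInv' (by omega)
        rw [dfsKids]
        simp only [if_pos (show c ≠ par from hcp), hrc]
        exact ihp (fun x hx => hmem x (List.mem_cons_of_mem _ hx)) (cnt + rc) false lc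
  obtain ⟨⟨cnt, isLeaf, leaf1⟩, hk⟩ :=
    kids (g.getD node []) (fun c hc => (hg node) ▸ hc) 0 true leaf
  by_cases hb : isLeaf = true
  · exact ⟨1, PySem.List.pySetD leaf1 node 1, by rw [dfsA, hk]; simp [hb]⟩
  · exact ⟨cnt, PySem.List.pySetD leaf1 node cnt, by rw [dfsA, hk]; simp [hb]⟩

-- ---- machine step equations ----
theorem runB_push {g : PySem.Dict Int (List Int)} {t : Nat} {node par ch : Int}
    {prest : List Int} {cnt : Int} {isLeaf : Bool}
    {rest : List (Int × Int × List Int × Int × Bool)} {leaf : List Int} (h : ch ≠ par) :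
    runB g (t + 1) ((node, par, ch :: prest, cnt, isLeaf) :: rest) leaf
      = runB g t ((ch, node, g.getD ch [], 0, true) :: (node, par, prest, cnt, isLeaf) :: rest) leaf := by
  rw [runB]; simp [h]

theorem runB_skip {g : PySem.Dict Int (List Int)} {t : Nat} {node par ch : Int}
    {prest : List Int} {cnt : Int} {isLeaf : Bool}
    {rest : List (Int × Int × List Int × Int × Bool)} {leaf : List Int} (h : ch = par) :
    runB g (t + 1) ((node, par, ch :: prest, cnt, isLeaf) :: rest) leaf
      = runB g t ((node, par, prest, cnt, isLeaf) :: rest) leaf := by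
  rw [runB]; simp [h]

theorem runB_pop {g : PySem.Dict Int (List Int)} {t : Nat} {node par : Int} {cnt : Int}
    {isLeaf : Bool} {rest : List (Int × Int × List Int × Int × Bool)} {leaf : List Int} :
    runB g (t + 1) ((node, par, ([] : List Int), cnt, isLeaf) :: rest) leaf
      = runB g t (pvAbsorb (if isLeaf then 1 else cnt) rest)
          (PySem.List.pySetD leaf node (if isLeaf then 1 else cnt)) := by
  rw [runB]

theorem runB_mono {g : PySem.Dict Int (List Int)} :
    ∀ (t : Nat) (s : List (Int × Int × List Int × Int × Bool)) (l r : List Int),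
      runB g t s l = some r → ∀ t', t ≤ t' → runB g t' s l = some r := by
  intro t
  induction t with
  | zero =>
    intro s l r h t' ht'
    cases s with
    | nil =>
      cases t' <;> simpa [runB] using h
    | cons fr rest => simp [runB] at h
  | succ u ih =>
    intro s l r h t' ht'
    cases s with
    | nil =>
      cases t' <;> simpa [runB] using h
    | cons fr rest =>
      obtain ⟨node, par, pending, cnt, isLeaf⟩ := fr
      obtain ⟨u', rfl⟩ : ∃ u', t' = u' + 1 := ⟨t' - 1, by omega⟩
      cases pending with
      | nil =>
        rw [runB_pop] at h ⊢
        exact ih _ _ _ h u' (by omega)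
      | cons ch prest =>
        by_cases hcp : ch = par
        · rw [runB_skip hcp] at h ⊢
          exact ih _ _ _ h u' (by omega)
        · rw [runB_push hcp] at h ⊢
          exact ih _ _ _ h u' (by omega)

-- ---- the machine simulates the dfs child loop, with a fuel bound ----
theorem pv_sim_kids {g : PySem.Dict Int (List Int)} {S : Nat}
    (hS : ∀ x, (g.getD x []).length ≤ S) :
    ∀ f : Nat, ∀ node par pending,
      ∀ cnt (isLeaf : Bool) leaf cnt' (isLeaf' : Bool) leaf1,
      dfsKids g f node par pending cnt isLeaf leaf = some (cnt', isLeaf', leaf1) →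
      ∃ k, k ≤ 2 * pending.length * (S + 2) ^ f ∧ ∀ rest m,
        runB g (k + m) ((node, par, pending, cnt, isLeaf) :: rest) leaf
          = runB g m ((node, par, [], cnt', isLeaf') :: rest) leaf1 := by
  intro f
  induction f using Nat.strong_induction_on with
  | _ f ih =>
  intro node par pending
  induction pending with
  | nil =>
    intro cnt isLeaf leaf cnt' isLeaf' leaf1 h
    rw [dfsKids] at h
    obtain ⟨h1, h2, h3⟩ : cnt = cnt' ∧ isLeaf = isLeaf' ∧ leaf = leaf1 := by
      simpa [Prod.ext_iff] using h
    subst h1; subst h2; subst h3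
    exact ⟨0, by simp, fun rest m => by rw [Nat.zero_add]⟩
  | cons ch prest ihp =>
    intro cnt isLeaf leaf cnt' isLeaf' leaf1 h
    by_cases hcp : ch = par
    · rw [dfsKids] at h
      simp only [hcp, ne_eq, not_true_eq_false] at h
      obtain ⟨k2, hb2, hk2⟩ := ihp cnt isLeaf leaf cnt' isLeaf' leaf1 (by simpa using h)
      have hpow : 1 ≤ (S + 2) ^ f := Nat.one_le_pow _ _ (by omega)
      refine ⟨k2 + 1, by simp [List.length_cons]; nlinarith, ?_⟩
      intro rest m
      have e1 : k2 + 1 + m = (k2 + m) + 1 := by omega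
      rw [e1, runB_skip hcp]
      exact hk2 rest m
    · rw [dfsKids] at h
      simp only [if_pos (show ch ≠ par from hcp)] at h
      cases hA : dfsA g f ch node leaf with
      | none => rw [hA] at h; simp at h
      | some pr =>
        obtain ⟨c, leafc⟩ := pr
        rw [hA] at h
        simp only at h
        obtain ⟨f1, rfl⟩ : ∃ f1, f = f1 + 1 := by
          cases f with
          | zero => rw [dfsA] at hA; simp at hA
          | succ f1 => exact ⟨f1, rfl⟩
        rw [dfsA] at hA
        cases hK : dfsKids g f1 ch node (g.getD ch []) 0 true leaf with
        | none => rw [hK] at hA; simp at hA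
        | some trip =>
          obtain ⟨ccnt, cisLeaf, cleaf⟩ := trip
          rw [hK] at hA
          have hc : c = (if cisLeaf then 1 else ccnt) ∧
              leafc = PySem.List.pySetD cleaf ch (if cisLeaf then 1 else ccnt) := by
            cases cisLeaf
            · simp only [Bool.false_eq_true, if_false] at hA ⊢
              simp only [Option.some.injEq, Prod.mk.injEq] at hA
              exact ⟨hA.1.symm, hA.2.symm⟩
            · simp only [if_true] at hA ⊢
              simp only [Option.some.injEq, Prod.mk.injEq] at hA
              exact ⟨hA.1.symm, hA.2.symm⟩
          obtain ⟨k1, hb1, hk1⟩ := ih f1 (by omega) ch node (g.getD ch []) 0 true leaf ccnt cisLeaf cleaf hK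
          obtain ⟨k2, hb2, hk2⟩ := ihp (cnt + c) false leafc cnt' isLeaf' leaf1 h
          have hpow : 1 ≤ (S + 2) ^ f1 := Nat.one_le_pow _ _ (by omega)
          have hlen : (g.getD ch []).length ≤ S := hS ch
          refine ⟨1 + k1 + 1 + k2, ?_, ?_⟩
          · have hb1' : k1 ≤ 2 * S * (S + 2) ^ f1 := by nlinarith
            have : (S + 2) ^ (f1 + 1) = (S + 2) ^ f1 * (S + 2) := by ring
            simp only [List.length_cons, this] at hb2 ⊢
            nlinarith
          · intro rest m
            have e1 : 1 + k1 + 1 + k2 + m = (k1 + (1 + (k2 + m))) + 1 := by omega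
            rw [e1, runB_push hcp,
              hk1 ((node, par, prest, cnt, isLeaf) :: rest) (1 + (k2 + m))]
            have e2 : 1 + (k2 + m) = (k2 + m) + 1 := by omega
            rw [e2, runB_pop]
            simp only [pvAbsorb]
            rw [← hc.1]
            have hlc : PySem.List.pySetD cleaf ch c = leafc := by
              rw [hc.1]
              exact hc.2.symm
            rw [hlc]
            exact hk2 rest m

-- ===== VERDICT (by name: the statement is the Claim_ definition above) =====
theorem solve_spec : Claim_equal_solve := by
  unfold Claim_equal_solve
  intro n edges q queries _hdom hpre
  obtain ⟨hn, hqlen, HS, HM', _Hquery⟩ := hpre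
  have HM : ∀ x ∈ pvNodes edges, pvReach edges (2 * edges.length + 1) x = true →
      (pvAdjS edges x).countP (fun y => pvDist edges y == pvDist edges x) = 0 ∧
      (x ≠ 1 → (pvAdjS edges x).countP (fun y => pvDist edges y + 1 == pvDist edges x) = 1) :=
    fun x hx hr => ⟨(HM' x hx hr).2.1, (HM' x hx hr).2.2⟩
  have hg : ∀ x, ((buildGraphNW n edges false false false).1).getD x [] = pvAdj edges x :=
    fun x => pv_adj_eq n edges x
  have hInv1 : pvInv edges 1 (-1) :=
    ⟨pvReach_mono (Nat.zero_le _) (by simp [pvReach, pvReachSet]), List.mem_cons_self,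
      Or.inl ⟨rfl, rfl⟩⟩
  obtain ⟨r, leafF, hA⟩ := pv_dfs_total HS HM hg (n.toNat + 2 * edges.length + 3) 1 (-1)
    (List.replicate (n + 1).toNat 0) hInv1 (by rw [pvDist_one]; omega)
  have hA' := hA
  rw [show n.toNat + 2 * edges.length + 3 = (n.toNat + 2 * edges.length + 2) + 1 from rfl,
    dfsA] at hA'
  cases hK : dfsKids (buildGraphNW n edges false false false).1
      (n.toNat + 2 * edges.length + 2) 1 (-1)
      (((buildGraphNW n edges false false false).1).getD 1 []) 0 true
      (List.replicate (n + 1).toNat 0) with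
  | none => rw [hK] at hA'; simp at hA'
  | some trip =>
    obtain ⟨cnt, isLeaf, leaf1⟩ := trip
    rw [hK] at hA'
    have hr : leafF = PySem.List.pySetD leaf1 1 (if isLeaf then 1 else cnt) := by
      cases isLeaf
      · simp only [Bool.false_eq_true, if_false] at hA' ⊢
        simp only [Option.some.injEq, Prod.mk.injEq] at hA'
        exact hA'.2.symm
      · simp only [if_true] at hA' ⊢
        simp only [Option.some.injEq, Prod.mk.injEq] at hA'
        exact hA'.2.symm
    obtain ⟨k, hkb, hsim⟩ := pv_sim_kids (S := 2 * edges.length)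
      (fun x => by rw [hg]; exact pv_adj_len edges x) (n.toNat + 2 * edges.length + 2) 1 (-1)
      (((buildGraphNW n edges false false false).1).getD 1 []) 0 true
      (List.replicate (n + 1).toNat 0) cnt isLeaf leaf1 hK
    have hrun : runB (buildGraphNW n edges false false false).1 (k + 1)
        [(1, -1, ((buildGraphNW n edges false false false).1).getD 1 [], 0, true)]
        (List.replicate (n + 1).toNat 0) = some leafF := by
      rw [hsim [] 1, show (1 : Nat) = 0 + 1 from rfl, runB_pop]
      simp only [pvAbsorb]
      rw [runB, hr]
    have hbig : k + 1 ≤ (2 * edges.length + 3) ^ (n.toNat + 2 * edges.length + 5) := by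
      have hlen : (((buildGraphNW n edges false false false).1).getD 1 []).length
          ≤ 2 * edges.length := by rw [hg]; exact pv_adj_len edges 1
      set S := 2 * edges.length with hSdef
      set e1 := n.toNat + 2 * edges.length + 2 with he1
      have h1 : (S + 2) ^ e1 ≤ (S + 3) ^ e1 := Nat.pow_le_pow_left (by omega) _
      have h3 : 1 ≤ (S + 3) ^ e1 := Nat.one_le_pow _ _ (by omega)
      have h4 : 2 * S + 1 ≤ (S + 3) ^ 3 := by
        have e : (S + 3) ^ 3 = S ^ 3 + 9 * S ^ 2 + 27 * S + 27 := by ring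
        omega
      have h5 : k ≤ 2 * S * (S + 2) ^ e1 :=
        le_trans hkb (Nat.mul_le_mul_right _ (by omega))
      have hm : 2 * S * (S + 2) ^ e1 ≤ 2 * S * (S + 3) ^ e1 :=
        Nat.mul_le_mul_left _ h1
      calc k + 1 ≤ 2 * S * (S + 2) ^ e1 + 1 := by omega
        _ ≤ 2 * S * (S + 3) ^ e1 + (S + 3) ^ e1 := by omega
        _ = (2 * S + 1) * (S + 3) ^ e1 := by ring
        _ ≤ (S + 3) ^ 3 * (S + 3) ^ e1 := Nat.mul_le_mul_right _ h4
        _ = (S + 3) ^ (3 + e1) := (pow_add _ 3 e1).symm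
        _ = (S + 3) ^ (n.toNat + 2 * edges.length + 5) := by
              congr 1
              omega
    have hrunF := runB_mono _ _ _ _ hrun _ hbig
    show solve n edges q queries = solve_alt n edges q queries
    rw [solve, solve_alt]
    simp only [hA, hrunF]
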